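-- pv_equiv track=rewrite | github.com/martijnbentum/stress-miniature-succotash | utils/codebook_analysis.py | combine_ci_and_metadata_to_phone_ci_dict
-- ===== SOURCE A (Python) =====
-- from collections import Counter
--
-- def combine_ci_and_metadata_to_phone_ci_dict(ci, metadata):
--     output = {}
--     for i in range(len(metadata)):
--         line = metadata[i]
--         phone = line['phone']
--         if phone not in output.keys(): output[phone] = []
--         codebook_indices = ci[i]
--         output[phone].extend(codebook_indices)
--     for phone, ci in output.items():
--         output[phone] = Counter(ci)
--
--     return output
-- ===== SOURCE B (Python) =====
-- from collections import Counter
--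
-- def combine_ci_and_metadata_to_phone_ci_dict(ci, metadata):
--     phones = []
--     for line in metadata:
--         p = line['phone']
--         if p not in phones:
--             phones.append(p)
--     return {p: Counter(x
--                        for indices, line in zip(ci, metadata)
--                        if line['phone'] == p
--                        for x in indices)
--             for p in phones}
-- ===== Notes on version B (the rewrite author's own statement) =====
-- stated objective: alternative
-- what changed: B first collects the distinct phones in first-seen order, then builds the result with a per-phone scan that counts the concatenation of the matching ci rows directly, instead of A's single dict-accumulating pass followed by a separate list-to-Counter conversion loop.
import Mathlib
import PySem

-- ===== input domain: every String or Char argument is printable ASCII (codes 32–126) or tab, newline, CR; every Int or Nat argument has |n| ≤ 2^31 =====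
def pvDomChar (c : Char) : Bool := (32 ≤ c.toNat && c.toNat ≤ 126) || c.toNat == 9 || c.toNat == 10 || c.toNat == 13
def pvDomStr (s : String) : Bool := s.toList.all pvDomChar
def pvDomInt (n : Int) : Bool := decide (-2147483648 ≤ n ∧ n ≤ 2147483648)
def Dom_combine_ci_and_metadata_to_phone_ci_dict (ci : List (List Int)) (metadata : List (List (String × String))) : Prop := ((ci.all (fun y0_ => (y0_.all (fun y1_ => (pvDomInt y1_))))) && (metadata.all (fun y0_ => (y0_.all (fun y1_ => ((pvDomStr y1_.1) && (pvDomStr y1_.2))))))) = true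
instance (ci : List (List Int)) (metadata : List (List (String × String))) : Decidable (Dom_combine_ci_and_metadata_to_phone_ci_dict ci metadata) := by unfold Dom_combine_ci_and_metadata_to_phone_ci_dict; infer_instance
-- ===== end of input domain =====

-- B replaces A's accumulate-into-a-dict-then-convert by two stages: first collect the
-- distinct phones in first-seen order, then for each phone count the concatenation of the
-- matching ci rows directly (objective: alternative decomposition, not faster).

-- ===== PORT A =====
-- 'line["phone"]' is exact under Pre_ (every metadata line has a "phone" key, so getD
-- never takes its default)
def pvKey (line : List (String × String)) : String :=
  (PySem.Dict.ofList line).getD "phone" ""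

-- loop body of A (helper so the proofs can name it)
def pvBodyA (output : PySem.Dict String (List Int)) (line : List (String × String))
    (codebook_indices : List Int) : PySem.Dict String (List Int) :=
  let phone := pvKey line
  let output := if output.contains phone then output else output.insert phone []
  output.modify phone [] (fun l => l ++ codebook_indices)

def combine_ci_and_metadata_to_phone_ci_dict (ci : List (List Int)) (metadata : List (List (String × String))) : List (String × List (Int × Int)) :=
  -- for i in range(len(metadata)): … ; ci[i] is exact under Pre_ (metadata no longer than ci)
  let output : PySem.Dict String (List Int) :=
    (PySem.List.pyRange 0 (PySem.List.len metadata) 1).foldl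
      (fun output i => pvBodyA output (PySem.List.pyGetD metadata i []) (PySem.List.pyGetD ci i []))
      PySem.Dict.empty
  -- for phone, ci in output.items(): output[phone] = Counter(ci)
  output.items.map (fun p => (p.1, (PySem.Dict.counter p.2).items))

-- ===== PORT B =====
-- first loop of B: the distinct phones in first-seen order
def pvPhones (lines : List (List (String × String))) : List String :=
  lines.foldl (fun acc line =>
    let p := pvKey line
    if acc.contains p then acc else acc ++ [p]) []

-- the generator inside B's Counter(...): all indices of rows whose line has this phone
def pvGather (L : List (List Int × List (String × String))) (p : String) : List Int :=
  L.flatMap (fun q => if pvKey q.2 == p then q.1 else [])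

def combine_ci_and_metadata_to_phone_ci_dict_alt (ci : List (List Int)) (metadata : List (List (String × String))) : List (String × List (Int × Int)) :=
  (pvPhones metadata).map
    (fun p => (p, (PySem.Dict.counter (pvGather (ci.zip metadata) p)).items))

-- ===== PRECONDITION & SPEC =====
-- Pre_ excludes exactly the inputs on which A raises: IndexError when metadata is longer
-- than ci, KeyError when some metadata line has no "phone" key.
def Pre_combine_ci_and_metadata_to_phone_ci_dict (ci : List (List Int)) (metadata : List (List (String × String))) : Prop :=
  metadata.length ≤ ci.length ∧
  ∀ line ∈ metadata, (PySem.Dict.ofList line).contains "phone" = true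
instance (ci : List (List Int)) (metadata : List (List (String × String))) : Decidable (Pre_combine_ci_and_metadata_to_phone_ci_dict ci metadata) := by unfold Pre_combine_ci_and_metadata_to_phone_ci_dict; infer_instance

def pvWitness_combine_ci_and_metadata_to_phone_ci_dict : List (List Int) × (List (List (String × String))) :=
  ([[1, 2, 1], [2]], [[("phone", "a")], [("phone", "a")]])

def Spec_combine_ci_and_metadata_to_phone_ci_dict (ci : List (List Int)) (metadata : List (List (String × String))) (out : List (String × List (Int × Int))) : Prop := out = combine_ci_and_metadata_to_phone_ci_dict_alt ci metadata
instance (ci : List (List Int)) (metadata : List (List (String × String))) (out : List (String × List (Int × Int))) : Decidable (Spec_combine_ci_and_metadata_to_phone_ci_dict ci metadata out) := by unfold Spec_combine_ci_and_metadata_to_phone_ci_dict; infer_instance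

-- ===== CLAIM (what is proved, stated in full; the proofs are below) =====
def Claim_equal_combine_ci_and_metadata_to_phone_ci_dict : Prop := ∀ (ci : List (List Int)) (metadata : List (List (String × String))), Dom_combine_ci_and_metadata_to_phone_ci_dict ci metadata → Pre_combine_ci_and_metadata_to_phone_ci_dict ci metadata → Spec_combine_ci_and_metadata_to_phone_ci_dict ci metadata (combine_ci_and_metadata_to_phone_ci_dict ci metadata)

-- ===== LEMMAS AND PROOFS =====

-- membership in B's phone list = some line has that phone
lemma pvContains_iff (l : List String) (x : String) : l.contains x = true ↔ x ∈ l := by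
  simp

lemma pvMem_phones_aux (lines : List (List (String × String))) :
    ∀ (acc : List String) (x : String),
    (x ∈ lines.foldl (fun acc line =>
        let p := pvKey line
        if acc.contains p then acc else acc ++ [p]) acc)
    ↔ x ∈ acc ∨ ∃ l ∈ lines, pvKey l = x := by
  induction lines with
  | nil => intro acc x; simp
  | cons l lines ih =>
    intro acc x
    simp only [List.foldl_cons]
    by_cases hc : acc.contains (pvKey l) = true
    · rw [if_pos hc, ih]
      have hmem : pvKey l ∈ acc := (pvContains_iff _ _).mp hc
      constructor
      · rintro (hx | ⟨m, hm, hkm⟩)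
        · exact Or.inl hx
        · exact Or.inr ⟨m, List.mem_cons_of_mem _ hm, hkm⟩
      · rintro (hx | ⟨m, hm, hkm⟩)
        · exact Or.inl hx
        · rcases List.mem_cons.mp hm with rfl | hm'
          · exact Or.inl (hkm ▸ hmem)
          · exact Or.inr ⟨m, hm', hkm⟩
    · rw [if_neg hc, ih]
      constructor
      · rintro (hx | ⟨m, hm, hkm⟩)
        · rcases List.mem_append.mp hx with hx | hx
          · exact Or.inl hx
          · exact Or.inr ⟨l, by simp, by simpa using (List.mem_singleton.mp hx).symm⟩
        · exact Or.inr ⟨m, List.mem_cons_of_mem _ hm, hkm⟩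
      · rintro (hx | ⟨m, hm, hkm⟩)
        · exact Or.inl (List.mem_append.mpr (Or.inl hx))
        · rcases List.mem_cons.mp hm with rfl | hm'
          · exact Or.inl (List.mem_append.mpr (Or.inr (by simp [hkm])))
          · exact Or.inr ⟨m, hm', hkm⟩

lemma pvMem_phones (lines : List (List (String × String))) (x : String) :
    x ∈ pvPhones lines ↔ ∃ l ∈ lines, pvKey l = x := by
  rw [pvPhones, pvMem_phones_aux]; simp

lemma pvPhones_snoc (lines : List (List (String × String))) (l : List (String × String)) :
    pvPhones (lines ++ [l]) =
    if (pvPhones lines).contains (pvKey l) then pvPhones lines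
    else pvPhones lines ++ [pvKey l] := by
  rw [pvPhones, List.foldl_append]; rfl

lemma pvGather_snoc (L : List (List Int × List (String × String)))
    (e : List Int × List (String × String)) (p : String) :
    pvGather (L ++ [e]) p = pvGather L p ++ (if pvKey e.2 == p then e.1 else []) := by
  simp [pvGather]

lemma pvGather_nil_of_not_mem (L : List (List Int × List (String × String))) (p : String)
    (h : ∀ e ∈ L, pvKey e.2 ≠ p) : pvGather L p = [] := by
  rw [pvGather, List.flatMap_eq_nil_iff]
  intro e he
  rw [if_neg (by simpa using h e he)]

-- reading a dict whose items are known to be ps.map (fun p => (p, g p))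
lemma pvAny_beq (k : String) : ∀ (ps : List String),
    (ps.any fun x => x == k) = ps.contains k := by
  intro ps
  induction ps with
  | nil => rfl
  | cons a ps ih =>
    by_cases hak : a = k
    · subst hak; simp
    · simp [List.any_cons, ih, List.contains_cons, hak, Ne.symm hak]

lemma pvContains_of_items {d : PySem.Dict String (List Int)} {ps : List String}
    {g : String → List Int} (h : d.items = ps.map (fun p => (p, g p))) (k : String) :
    d.contains k = ps.contains k := by
  simp only [PySem.Dict.contains, h, List.any_map, Function.comp_def]
  exact pvAny_beq k ps

lemma pvFind?_beq (q : String) : ∀ (ps : List String),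
    ps.find? (fun p => p == q) = if ps.contains q then some q else none := by
  intro ps
  induction ps with
  | nil => rfl
  | cons a ps ih =>
    by_cases ha : a = q
    · subst ha; simp
    · have hb : (a == q) = false := by simpa using ha
      simp [List.find?_cons, hb, ih, Ne.symm ha]

lemma pvGetD_of_items {d : PySem.Dict String (List Int)} {ps : List String}
    {g : String → List Int} (h : d.items = ps.map (fun p => (p, g p))) (k : String)
    (hg : ps.contains k = false → g k = []) :
    d.getD k [] = g k := by
  rw [PySem.Dict.getD_eq_get?_getD]
  simp only [PySem.Dict.get?, h, List.find?_map]
  rw [show (fun kv : String × List Int => kv.1 == k) ∘ (fun p => (p, g p)) = (fun p => p == k) from rfl,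
      pvFind?_beq]
  by_cases hc : ps.contains k = true
  · have hm : k ∈ ps := (pvContains_iff ps k).mp hc
    simp [hm]
  · simp only [Bool.not_eq_true] at hc
    have hm : k ∉ ps := fun hmm => by simp at hc; exact hc hmm
    simp [hm, hg hc]

-- the invariant: A's accumulated dict has exactly B's phones as keys, each mapped to
-- B's gathered index list
lemma pvMain : ∀ (L : List (List Int × List (String × String))),
    (L.foldl (fun d q => pvBodyA d q.2 q.1) PySem.Dict.empty).items
    = (pvPhones (L.map Prod.snd)).map (fun p => (p, pvGather L p)) := by
  intro L
  induction L using List.reverseRecOn with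
  | nil => rfl
  | append_singleton L e ih =>
    set q := pvKey e.2 with hq
    set d := L.foldl (fun d q => pvBodyA d q.2 q.1) PySem.Dict.empty with hd
    set ps := pvPhones (L.map Prod.snd) with hps
    have hcont : d.contains q = ps.contains q := pvContains_of_items ih q
    have hgetD : d.getD q [] = pvGather L q := by
      refine pvGetD_of_items ih q (fun hnc => ?_)
      refine pvGather_nil_of_not_mem L q (fun m hm hkm => ?_)
      have hmem : q ∈ ps := (pvMem_phones _ q).mpr ⟨m.2, List.mem_map_of_mem hm, hkm⟩
      rw [← pvContains_iff] at hmem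
      rw [hnc] at hmem
      cases hmem
    have hfold : ((L ++ [e]).foldl (fun d q => pvBodyA d q.2 q.1) PySem.Dict.empty)
        = pvBodyA d e.2 e.1 := by rw [List.foldl_append]; rfl
    have hphones : pvPhones ((L ++ [e]).map Prod.snd)
        = if ps.contains q then ps else ps ++ [q] := by
      rw [List.map_append]; exact pvPhones_snoc _ _
    rw [hfold, pvBodyA, hphones]
    by_cases hc : ps.contains q = true
    · rw [if_pos hc, if_pos (by rw [hcont]; exact hc)]
      rw [PySem.Dict.modify, hgetD,
          PySem.Dict.items_insert_of_contains _ _ (by rw [hcont]; exact hc), ih,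
          List.map_map]
      refine List.map_congr_left fun p _ => ?_
      by_cases hp : p = q
      · subst hp; simp [pvGather_snoc, ← hq]
      · have h1 : (p == q) = false := by simpa using hp
        have h2 : (q == p) = false := by simpa using (Ne.symm hp)
        simp [Function.comp, h1, pvGather_snoc, ← hq, h2]
    · have hc' : d.contains q = false := by rw [hcont]; simpa using hc
      rw [if_neg (show ¬ d.contains (pvKey e.2) = true by rw [← hq]; simp [hc']), if_neg hc]
      have hins : (d.insert q []).contains q = true := by
        simp
      rw [PySem.Dict.modify, PySem.Dict.getD_insert_self,
          PySem.Dict.items_insert_of_contains _ _ hins,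
          PySem.Dict.items_insert_of_not_contains _ _ hc', ih,
          List.map_append, List.map_map, List.map_append]
      have hq_not : ∀ p ∈ ps, p ≠ q := by
        intro p hp hpq
        subst hpq
        rw [← pvContains_iff] at hp
        exact hc hp
      have hgnil : pvGather L q = [] := by
        refine pvGather_nil_of_not_mem L q (fun m hm hkm => ?_)
        have hmem : q ∈ ps := (pvMem_phones _ q).mpr ⟨m.2, List.mem_map_of_mem hm, hkm⟩
        exact hq_not q hmem rfl
      congr 1
      · refine List.map_congr_left fun p hp => ?_
        have h1 : (p == q) = false := by simpa using hq_not p hp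
        have h2 : (q == p) = false := by simpa using (Ne.symm (hq_not p hp))
        simp [Function.comp, h1, pvGather_snoc, ← hq, h2]
      · simp [pvGather_snoc, ← hq, hgnil]

-- A's range-indexed loop is the fold over zip ci metadata when metadata is no longer than ci
lemma pvFoldl_range_getD {γ : Type} (f : γ → List (String × String) → List Int → γ) :
    ∀ (ms : List (List (String × String))) (cs : List (List Int)) (init : γ),
    ms.length ≤ cs.length →
    (List.range ms.length).foldl (fun d k => f d (ms.getD k []) (cs.getD k [])) init
    = (cs.zip ms).foldl (fun d p => f d p.2 p.1) init := by
  intro ms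
  induction ms with
  | nil => intro cs init _; simp
  | cons m ms ih =>
    intro cs init hlen
    cases cs with
    | nil => simp at hlen
    | cons c cs =>
      simp only [List.length_cons, List.range_succ_eq_map, List.foldl_cons, List.foldl_map,
        List.getD_cons_zero, List.getD_cons_succ, List.zip_cons_cons]
      exact ih cs _ (by simpa using hlen)

lemma pvRange_loop_eq_zip {γ : Type} (f : γ → List (String × String) → List Int → γ)
    (metadata : List (List (String × String))) (ci : List (List Int)) (init : γ)
    (hlen : metadata.length ≤ ci.length) :
    (PySem.List.pyRange 0 (PySem.List.len metadata) 1).foldl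
      (fun d i => f d (PySem.List.pyGetD metadata i []) (PySem.List.pyGetD ci i [])) init
    = (ci.zip metadata).foldl (fun d p => f d p.2 p.1) init := by
  rw [PySem.List.pyRange_one]
  simp only [List.foldl_map, PySem.List.len, Int.zero_add, PySem.List.pyGetD_natCast]
  exact pvFoldl_range_getD f metadata ci init hlen

-- ===== VERDICT (by name: the statement is the Claim_ definition above) =====
theorem combine_ci_and_metadata_to_phone_ci_dict_spec : Claim_equal_combine_ci_and_metadata_to_phone_ci_dict := by
  intro ci metadata _ hpre
  unfold Spec_combine_ci_and_metadata_to_phone_ci_dict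
  simp only [combine_ci_and_metadata_to_phone_ci_dict, combine_ci_and_metadata_to_phone_ci_dict_alt]
  rw [pvRange_loop_eq_zip pvBodyA metadata ci PySem.Dict.empty hpre.1, pvMain,
      List.map_snd_zip hpre.1, List.map_map]
  rfl
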